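-- pv_equiv track=rewrite | github.com/DoctorN8/gse-telemetry-control-simulator | rag/rag_assistant.py | _extract_maintenance
-- ===== SOURCE A (Python) =====
-- def _extract_maintenance(context: str) -> str:
--     lines = context.split('\n')
--     result = []
--     in_maintenance = False
--
--     for line in lines:
--         if 'Maintenance' in line or 'Daily:' in line or 'Weekly:' in line or 'Monthly:' in line or 'Annually:' in line:
--             in_maintenance = True
--
--         if in_maintenance:
--             result.append(line)
--             if len(result) > 30:
--                 break
--
--     if result:
--         return '\n'.join(result).strip()
--
--     return context[:1000] + "..." if len(context) > 1000 else context
-- ===== SOURCE B (Python) =====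
-- def _extract_maintenance(context: str) -> str:
--     lines = context.split('\n')
--     markers = ('Maintenance', 'Daily:', 'Weekly:', 'Monthly:', 'Annually:')
--     start = next((i for i, line in enumerate(lines)
--                   if any(m in line for m in markers)), None)
--     if start is not None:
--         return '\n'.join(lines[start:start + 31]).strip()
--     return context[:1000] + "..." if len(context) > 1000 else context
-- ===== Notes on version B (the rewrite author's own statement) =====
-- stated objective: simpler
-- what changed: Replaces the flag-carrying accumulate-and-break loop by a single search for the first marker line followed by a 31-line slice and join; the fallback is unchanged.
import Mathlib
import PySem

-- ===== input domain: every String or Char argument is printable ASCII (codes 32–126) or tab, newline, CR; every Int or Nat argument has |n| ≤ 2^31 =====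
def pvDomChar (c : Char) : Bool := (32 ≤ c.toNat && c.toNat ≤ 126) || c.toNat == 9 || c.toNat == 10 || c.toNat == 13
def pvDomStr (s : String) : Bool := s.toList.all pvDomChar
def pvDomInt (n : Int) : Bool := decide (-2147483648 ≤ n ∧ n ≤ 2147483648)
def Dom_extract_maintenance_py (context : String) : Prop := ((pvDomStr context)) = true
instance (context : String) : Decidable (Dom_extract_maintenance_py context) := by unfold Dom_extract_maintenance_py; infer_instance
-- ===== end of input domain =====

-- B changes the decomposition: instead of A's flag-carrying accumulate-and-break loop it finds the
-- first marker line and takes a 31-line slice; objective: simpler.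

-- ===== PORT A =====
-- A's marker test: the ||-chain of the five 'in' tests, in order
def pvHasMarkerA (line : String) : Bool :=
  PySem.Str.isIn "Maintenance" line || PySem.Str.isIn "Daily:" line ||
  PySem.Str.isIn "Weekly:" line || PySem.Str.isIn "Monthly:" line ||
  PySem.Str.isIn "Annually:" line

-- A's for-loop with state (result, in_maintenance) and the break on len(result) > 30
def pvLoopA : List String → List String → Bool → List String
  | [], result, _ => result
  | line :: rest, result, inm =>
    let inm := if pvHasMarkerA line then true else inm
    if inm then
      let result := result ++ [line]
      if result.length > 30 then result else pvLoopA rest result inm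
    else pvLoopA rest result inm

def extract_maintenance_py (context : String) : String :=
  let lines := (PySem.Str.split? context "\n").getD []   -- sep "\n" ≠ "", so split? is always `some`
  let result := pvLoopA lines [] false
  if result ≠ [] then PySem.Str.strip (PySem.Str.join "\n" result)
  else if PySem.Str.len context > 1000 then PySem.Str.slice context none (some 1000) ++ "..."
  else context

-- ===== PORT B =====
def pvMarkers : List String := ["Maintenance", "Daily:", "Weekly:", "Monthly:", "Annually:"]

def pvHasMarkerB (line : String) : Bool := pvMarkers.any (fun m => PySem.Str.isIn m line)

def extract_maintenance_py_alt (context : String) : String :=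
  let lines := (PySem.Str.split? context "\n").getD []   -- sep "\n" ≠ "", so split? is always `some`
  match lines.findIdx? pvHasMarkerB with
  | some i =>
      PySem.Str.strip (PySem.Str.join "\n"
        (PySem.List.slice lines (some (i : Int)) (some ((i : Int) + 31))))
  | none =>
      if PySem.Str.len context > 1000 then PySem.Str.slice context none (some 1000) ++ "..."
      else context

-- ===== PRECONDITION & SPEC =====
def Spec_extract_maintenance_py (context : String) (out : String) : Prop := out = extract_maintenance_py_alt context
instance (context : String) (out : String) : Decidable (Spec_extract_maintenance_py context out) := by unfold Spec_extract_maintenance_py; infer_instance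

-- ===== CLAIM (what is proved, stated in full; the proofs are below) =====
def Claim_equal_extract_maintenance_py : Prop := ∀ (context : String), Dom_extract_maintenance_py context → Spec_extract_maintenance_py context (extract_maintenance_py context)

-- ===== LEMMAS AND PROOFS =====
theorem pvMarker_eq (line : String) : pvHasMarkerA line = pvHasMarkerB line := by
  simp [pvHasMarkerA, pvHasMarkerB, pvMarkers, List.any, Bool.or_assoc]

-- once in_maintenance is true, the loop just appends lines until 31 are collected
theorem pvLoopA_true (ls : List String) (res : List String) (h : res.length ≤ 30) :
    pvLoopA ls res true = res ++ ls.take (31 - res.length) := by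
  induction ls generalizing res with
  | nil => simp [pvLoopA]
  | cons l rest ih =>
    simp only [pvLoopA, ite_self, if_true]
    by_cases h30 : res.length = 30
    · rw [if_pos (by simp [h30])]
      simp [h30]
    · rw [if_neg (by simp; omega)]
      rw [ih (res ++ [l]) (by simp; omega)]
      have h31 : 31 - res.length = (31 - (res ++ [l]).length) + 1 := by simp; omega
      rw [h31, List.take_succ_cons]
      simp

-- the flag-carrying loop started cold equals findIdx? + drop/take
theorem pvLoopA_false (ls : List String) :
    pvLoopA ls [] false =
      (match ls.findIdx? pvHasMarkerB with
       | some i => (ls.drop i).take 31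
       | none => []) := by
  induction ls with
  | nil => simp [pvLoopA]
  | cons l rest ih =>
    by_cases hm : pvHasMarkerA l
    · have hb : pvHasMarkerB l = true := by rw [← pvMarker_eq]; exact hm
      simp only [pvLoopA, hm, if_true, List.findIdx?_cons, hb]
      rw [if_neg (by simp)]
      rw [show ([] : List String) ++ [l] = [l] by simp, pvLoopA_true rest [l] (by simp)]
      simp
    · have hb : pvHasMarkerB l = false := by rw [← pvMarker_eq]; simpa using hm
      simp only [pvLoopA, hm, if_false, List.findIdx?_cons, hb, Bool.false_eq_true]
      rw [ih]
      cases h : rest.findIdx? pvHasMarkerB <;> simp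

-- ===== VERDICT (by name: the statement is the Claim_ definition above) =====
theorem extract_maintenance_py_spec : Claim_equal_extract_maintenance_py := by
  intro context _
  unfold Spec_extract_maintenance_py extract_maintenance_py extract_maintenance_py_alt
  simp only [pvLoopA_false]
  cases h : ((PySem.Str.split? context "\n").getD []).findIdx? pvHasMarkerB with
  | none => simp
  | some i =>
    obtain ⟨hi, -⟩ := List.findIdx?_eq_some_iff_getElem.mp h
    dsimp only
    have hc : ((i : Int) + 31) = ((i + 31 : Nat) : Int) := by push_cast; ring
    rw [hc, PySem.List.slice_natCast]
    have hne : (((PySem.Str.split? context "\n").getD []).drop i).take 31 ≠ [] := by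
      simp [List.take_eq_nil_iff]
      omega
    simp [hne]
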